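-- pv_equiv track=rewrite | github.com/inbasu/Python_alg | lesson_2/#5.py | ascii_list
-- ===== SOURCE A (Python) =====
-- def ascii_list(start, end):
--    result = ''
--    row = 0
--    for i in range(start, end):
--       result += f' {i}: {chr(i)}; '
--       row += 1
--       if not row % 10:
--          row = 0
--          result += '\n'
--    return result
-- ===== SOURCE B (Python) =====
-- def ascii_list(start, end):
--     rows = []
--     for s in range(start, end, 10):
--         e = min(s + 10, end)
--         rows.append(''.join(f' {i}: {chr(i)}; ' for i in range(s, e))
--                     + ('\n' if e - s == 10 else ''))
--     return ''.join(rows)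
-- ===== Notes on version B (the rewrite author's own statement) =====
-- stated objective: alternative
-- what changed: A's single flat loop with a string accumulator and a modulo-10 row counter is replaced by explicit grouping: iterate over chunk starts with range(start, end, 10), join each row of at most ten entries, append ' ' only to full rows, and concatenate the rows.
import Mathlib
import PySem

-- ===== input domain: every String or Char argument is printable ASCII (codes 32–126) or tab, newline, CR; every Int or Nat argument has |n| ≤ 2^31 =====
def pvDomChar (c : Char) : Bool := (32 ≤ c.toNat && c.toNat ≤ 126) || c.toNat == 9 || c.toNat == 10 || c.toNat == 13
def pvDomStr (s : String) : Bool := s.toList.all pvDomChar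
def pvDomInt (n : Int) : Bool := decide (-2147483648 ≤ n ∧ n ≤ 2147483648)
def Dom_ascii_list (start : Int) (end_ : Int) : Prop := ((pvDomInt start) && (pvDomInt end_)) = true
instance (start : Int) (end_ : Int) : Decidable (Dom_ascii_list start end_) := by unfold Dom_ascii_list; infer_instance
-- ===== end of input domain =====

-- B replaces A's flat accumulator loop with a modulo row counter by explicit grouping of the
-- range into rows of ten (range(start,end,10)), joining each row and concatenating (alternative
-- decomposition, same cost).

-- ===== PORT A =====
-- chr(i) as a one-character string; exact for every i whose chr is a Unicode scalar value
-- (0 ≤ i < 0x110000, i not a surrogate) — exactly the codes Pre_ admits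
def pyChr (i : Int) : String := String.mk [Char.ofNat i.toNat]

def ascii_list (start : Int) (end_ : Int) : String :=
  ((PySem.List.pyRange start end_ 1).foldl
    (fun (st : String × Int) i =>
      let result := st.1 ++ (" " ++ PySem.Int.toStr i ++ ": " ++ pyChr i ++ "; ")
      let row := st.2 + 1
      if PySem.Int.mod row 10 = 0 then (result ++ "\n", 0) else (result, row))
    ("", 0)).1

-- ===== PORT B =====
def ascii_list_alt (start : Int) (end_ : Int) : String :=
  String.join ((PySem.List.pyRange start end_ 10).map (fun s =>
    let e := min (s + 10) end_
    String.join ((PySem.List.pyRange s e 1).map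
        (fun i => " " ++ PySem.Int.toStr i ++ ": " ++ pyChr i ++ "; "))
      ++ (if e - s = 10 then "\n" else "")))

-- ===== PRECONDITION & SPEC =====
-- Pre_ excludes (a) the inputs on which A raises ValueError (chr on a code point outside
-- [0, 0x110000)), and (b) ranges containing a UTF-16 surrogate code point 0xD800–0xDFFF: there
-- A returns (and Python B returns the identical value, see the cite), but that value is a str
-- containing a lone surrogate, which is not a Unicode scalar value and hence is not a value of
-- the declared return type String — it cannot be stated, let alone matched, on the Lean side.
def Pre_ascii_list (start : Int) (end_ : Int) : Prop :=
  end_ ≤ start ∨ (0 ≤ start ∧ (end_ ≤ 55296 ∨ (57344 ≤ start ∧ end_ ≤ 1114112)))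
instance (start : Int) (end_ : Int) : Decidable (Pre_ascii_list start end_) := by
  unfold Pre_ascii_list; infer_instance
def pvWitness_ascii_list : Int × Int := (60, 85)

def Spec_ascii_list (start : Int) (end_ : Int) (out : String) : Prop := out = ascii_list_alt start end_
instance (start : Int) (end_ : Int) (out : String) : Decidable (Spec_ascii_list start end_ out) := by unfold Spec_ascii_list; infer_instance

-- ===== CLAIM (what is proved, stated in full; the proofs are below) =====
def Claim_equal_ascii_list : Prop := ∀ (start : Int) (end_ : Int), Dom_ascii_list start end_ → Pre_ascii_list start end_ → Spec_ascii_list start end_ (ascii_list start end_)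

-- ===== LEMMAS AND PROOFS =====

-- the step function of A's loop, named for the proofs
def stepA (st : String × Int) (i : Int) : String × Int :=
  let result := st.1 ++ (" " ++ PySem.Int.toStr i ++ ": " ++ pyChr i ++ "; ")
  let row := st.2 + 1
  if PySem.Int.mod row 10 = 0 then (result ++ "\n", 0) else (result, row)

def pvItem (i : Int) : String := " " ++ PySem.Int.toStr i ++ ": " ++ pyChr i ++ "; "

lemma ascii_list_eq_foldl (s e : Int) :
    ascii_list s e = ((PySem.List.pyRange s e 1).foldl stepA ("", 0)).1 := rfl

lemma map_pvItem (l : List Int) :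
    l.map (fun i => " " ++ PySem.Int.toStr i ++ ": " ++ pyChr i ++ "; ") = l.map pvItem := rfl

lemma str_foldl_append (l : List String) (a : String) :
    l.foldl (· ++ ·) a = a ++ l.foldl (· ++ ·) "" := by
  induction l generalizing a with
  | nil => simp
  | cons x l ih =>
    simp only [List.foldl_cons]
    rw [ih (a ++ x), ih ("" ++ x)]
    simp [String.append_assoc]

lemma str_join_nil : String.join ([] : List String) = "" := rfl

lemma str_join_cons (a : String) (l : List String) :
    String.join (a :: l) = a ++ String.join l := by
  simp only [String.join, List.foldl_cons]
  rw [str_foldl_append]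
  simp

lemma pyRange_ten_eq_nil {a b : Int} (h : b ≤ a) : PySem.List.pyRange a b 10 = [] := by
  rw [PySem.List.pyRange_of_pos a b (by norm_num)]
  rw [if_neg (by omega)]
  simp

lemma pyRange_ten_cons {a b : Int} (h : a < b) :
    PySem.List.pyRange a b 10 = a :: PySem.List.pyRange (a + 10) b 10 := by
  rw [PySem.List.pyRange_of_pos a b (by norm_num),
      PySem.List.pyRange_of_pos (a + 10) b (by norm_num)]
  rw [if_pos h]
  have hn : ((b - a + 10 - 1) / 10).toNat =
      (if a + 10 < b then ((b - (a + 10) + 10 - 1) / 10).toNat else 0) + 1 := by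
    split_ifs with h10 <;> omega
  rw [hn, List.range_succ_eq_map]
  simp only [List.map_cons, List.map_map]
  refine List.cons_eq_cons.mpr ⟨by norm_num, ?_⟩
  apply List.map_congr_left
  intro k _
  simp only [Function.comp_apply, Nat.succ_eq_add_one]
  push_cast; ring

lemma chunk_fold (j : ℕ) : ∀ (s : Int) (acc : String) (r : ℕ), r < 10 → r + j ≤ 10 →
    (PySem.List.pyRange s (s + (j : Int)) 1).foldl stepA (acc, (r : Int)) =
      (acc ++ String.join ((PySem.List.pyRange s (s + (j : Int)) 1).map pvItem)
         ++ (if r + j = 10 then "\n" else ""),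
       if r + j = 10 then 0 else ((r + j : ℕ) : Int)) := by
  induction j with
  | zero =>
    intro s acc r hr _
    rw [PySem.List.pyRange_one_eq_nil (by omega)]
    have h10 : ¬ (r = 10) := by omega
    simp [h10, str_join_nil]
  | succ j ih =>
    intro s acc r hr hle
    rw [PySem.List.pyRange_one_cons (by omega : s < s + ((j + 1 : ℕ) : Int))]
    rw [List.foldl_cons, List.map_cons, str_join_cons]
    have hstep : stepA (acc, (r : Int)) s =
        if r = 9 then (acc ++ pvItem s ++ "\n", 0) else (acc ++ pvItem s, ((r : Int) + 1)) := by
      have hmod : PySem.Int.mod ((r : Int) + 1) 10 = ((r : Int) + 1) % 10 :=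
        PySem.Int.mod_eq_emod_of_pos (by norm_num)
      simp only [stepA, pvItem, hmod]
      split_ifs with h1 h2 h2 <;> first | rfl | omega
    rw [hstep]
    by_cases hr9 : r = 9
    · subst hr9
      have hj0 : j = 0 := by omega
      subst hj0
      rw [if_pos rfl]
      have he : s + ((0 + 1 : ℕ) : Int) = s + 1 := by push_cast; ring
      rw [he, PySem.List.pyRange_one_eq_nil (le_refl (s + 1))]
      simp [str_join_nil, String.append_assoc]
    · rw [if_neg hr9]
      have hrange : PySem.List.pyRange (s + 1) (s + ((j + 1 : ℕ) : Int)) 1 =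
          PySem.List.pyRange (s + 1) ((s + 1) + (j : Int)) 1 := by
        congr 1; push_cast; ring
      rw [hrange]
      have hcast : ((r : Int) + 1) = (((r + 1 : ℕ)) : Int) := by push_cast; ring
      rw [hcast, ih (s + 1) (acc ++ pvItem s) (r + 1) (by omega) (by omega), ← hrange]
      have hiff : (r + 1 + j = 10) ↔ (r + (j + 1) = 10) := by omega
      simp only [Prod.mk.injEq]
      constructor
      · split_ifs with h1 h2 h2 <;> first | omega | simp [String.append_assoc]
      · split_ifs with h1 h2 h2 <;> omega

lemma main_fold (n : ℕ) : ∀ (s e : Int) (acc : String), e ≤ s + 10 * n →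
    ((PySem.List.pyRange s e 1).foldl stepA (acc, 0)).1 = acc ++ ascii_list_alt s e := by
  induction n with
  | zero =>
    intro s e acc h
    rw [PySem.List.pyRange_one_eq_nil (by omega), ascii_list_alt,
        pyRange_ten_eq_nil (by omega)]
    simp [str_join_nil]
  | succ n ih =>
    intro s e acc h
    by_cases hse : e ≤ s
    · rw [PySem.List.pyRange_one_eq_nil hse, ascii_list_alt, pyRange_ten_eq_nil hse]
      simp [str_join_nil]
    · push_neg at hse
      by_cases h10 : s + 10 ≤ e
      · -- a full row of ten, then recurse on the rest of the range
        rw [PySem.List.pyRange_one_append s (s + 10) e (by omega) (by omega),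
            List.foldl_append]
        have hc := chunk_fold 10 s acc 0 (by omega) (by omega)
        have hcast : s + ((10 : ℕ) : Int) = s + 10 := by push_cast; ring
        rw [hcast] at hc
        norm_num at hc
        rw [hc, ih (s + 10) e _ (by omega)]
        simp only [ascii_list_alt]
        rw [pyRange_ten_cons hse, List.map_cons, str_join_cons]
        have hmin : min (s + 10) e = s + 10 := by omega
        have hd : s + 10 - s = 10 := by omega
        rw [map_pvItem]
        simp [hmin, hd, String.append_assoc]
      · -- last, partial row of fewer than ten
        push_neg at h10
        have hc := chunk_fold (e - s).toNat s acc 0 (by omega) (by omega)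
        have hj : s + (((e - s).toNat : ℕ) : Int) = e := by omega
        rw [hj] at hc
        have hT : ¬ (0 + (e - s).toNat = 10) := by omega
        simp only [if_neg hT] at hc
        simp only [Nat.cast_zero] at hc
        rw [hc]
        simp only [ascii_list_alt]
        rw [pyRange_ten_cons hse, pyRange_ten_eq_nil (by omega : e ≤ s + 10),
            List.map_cons, List.map_nil, str_join_cons, str_join_nil]
        have hmin : min (s + 10) e = e := by omega
        have hd : ¬ (e - s = 10) := by omega
        rw [map_pvItem]
        simp [hmin, hd, String.append_assoc]

-- ===== VERDICT (by name: the statement is the Claim_ definition above) =====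
theorem ascii_list_spec : Claim_equal_ascii_list := by
  intro start end_ _ _
  unfold Spec_ascii_list
  rw [ascii_list_eq_foldl]
  have h := main_fold (end_ - start).toNat start end_ "" (by omega)
  rw [h]
  simp
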